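-- pv_equiv track=rewrite | github.com/AyushAryal/mazesolving | maze.py | dimension
-- ===== SOURCE A (Python) =====
-- def dimension(maze):
--     x=0
--     y=0
--     for row in maze:
--         x+=1
--         y=0
--         for col in row:
--             y+=1
--     return(x,y)
-- ===== SOURCE B (Python) =====
-- def dimension(maze):
--     rows = len(maze)
--     cols = len(maze[-1]) if maze else 0
--     return (rows, cols)
-- ===== Notes on version B (the rewrite author's own statement) =====
-- stated objective: faster
-- what changed: Replaces the nested counting loops with direct length queries: rows = len(maze) and cols = len of the last row (0 if empty), which is exactly the value A's inner counter holds after the loop.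
import Mathlib
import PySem

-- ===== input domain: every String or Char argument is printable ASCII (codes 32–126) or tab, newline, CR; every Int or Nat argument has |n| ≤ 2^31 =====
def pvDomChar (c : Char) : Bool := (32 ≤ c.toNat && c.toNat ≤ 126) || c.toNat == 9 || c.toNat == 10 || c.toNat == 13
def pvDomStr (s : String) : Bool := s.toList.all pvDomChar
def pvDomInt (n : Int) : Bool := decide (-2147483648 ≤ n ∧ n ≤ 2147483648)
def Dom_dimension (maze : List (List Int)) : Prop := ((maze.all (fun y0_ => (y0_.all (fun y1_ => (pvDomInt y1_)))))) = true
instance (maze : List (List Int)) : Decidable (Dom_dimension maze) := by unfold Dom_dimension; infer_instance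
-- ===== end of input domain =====

-- B replaces A's nested counting loops by direct length queries (len of maze, len of last row): asymptotically faster.


-- ===== PORT A =====
-- x=0; y=0; for row: x+=1; y=0; for col: y+=1; return (x,y)
def dimension (maze : List (List Int)) : Int × Int :=
  maze.foldl (fun (p : Int × Int) row => (p.1 + 1, row.foldl (fun y _ => y + 1) 0)) (0, 0)

-- ===== PORT B =====
-- rows = len(maze); cols = len(maze[-1]) if maze else 0
def dimension_alt (maze : List (List Int)) : Int × Int :=
  ((maze.length : Int), match maze.getLast? with
    | none => 0
    | some r => (r.length : Int))

-- ===== PRECONDITION & SPEC =====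
def Spec_dimension (maze : List (List Int)) (out : Int × Int) : Prop := out = dimension_alt maze
instance (maze : List (List Int)) (out : Int × Int) : Decidable (Spec_dimension maze out) := by unfold Spec_dimension; infer_instance

-- ===== CLAIM (what is proved, stated in full; the proofs are below) =====
def Claim_equal_dimension : Prop := ∀ (maze : List (List Int)), Dom_dimension maze → Spec_dimension maze (dimension maze)

-- ===== LEMMAS AND PROOFS =====
theorem pv_inner (r : List Int) (y : Int) :
    r.foldl (fun y _ => y + 1) y = y + r.length := by
  induction r generalizing y with
  | nil => simp
  | cons a t ih => simp [List.foldl, ih]; ring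

theorem pv_outer (maze : List (List Int)) (x y : Int) :
    maze.foldl (fun (p : Int × Int) row => (p.1 + 1, row.foldl (fun y _ => y + 1) 0)) (x, y)
      = (x + maze.length, match maze.getLast? with
          | none => y
          | some r => (r.length : Int)) := by
  induction maze generalizing x y with
  | nil => simp
  | cons r t ih =>
    rw [List.foldl_cons, ih]
    cases t with
    | nil => simp [pv_inner]
    | cons r' t' =>
      simp only [List.getLast?_cons_cons, List.length_cons]
      push_cast
      rw [Prod.mk.injEq]
      constructor
      · ring
      · rfl

-- ===== VERDICT (by name: the statement is the Claim_ definition above) =====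
theorem dimension_spec : Claim_equal_dimension := by
  intro maze _
  show dimension maze = dimension_alt maze
  simp [dimension, dimension_alt, pv_outer]
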